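-- pv_equiv track=rewrite | github.com/VarunPius/PracticeProblems | Challenges/AmazonOnlineAssessment/Turnstile/Solution.py | turnstileTimes
-- ===== SOURCE A (Python) =====
-- def turnstileTimes(numCustomers, arrTime, direction):
--     start = arrTime[0]
--     exiting  = []
--     entering = []
--
--     for i in range(0, numCustomers):
--         if direction[i] == 0:
--             entering.append((arrTime[i], i))
--         else:
--             exiting.append((arrTime[i], i))
--
--     res = [-1 for _ in range(numCustomers)]
--
--     enterI = 0
--     exitI = 0
--     exitPrio = True
--     currTime = start
--     prevTime = -1
--
--     while enterI < len(entering) and exitI < len(exiting):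
--         currExitTime = max(exiting[exitI][0], currTime)
--         currEnterTime = max(entering[enterI][0], currTime)
--         if currEnterTime < currExitTime:
--             res[entering[enterI][1]] = currEnterTime
--             prevTime = currEnterTime
--             currTime = prevTime + 1
--             enterI += 1
--             exitPrio = False
--         elif currExitTime < currEnterTime:
--             res[exiting[exitI][1]] = currExitTime
--             prevTime = currExitTime
--             currTime = prevTime + 1
--             exitI += 1
--             exitPrio = True
--         else:
--             if currTime - prevTime > 1:
--                 exitPrio = True
--             if not exitPrio:
--                 res[entering[enterI][1]] = currEnterTime
--                 prevTime = currEnterTime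
--                 currTime = prevTime + 1
--                 enterI += 1
--             else:
--                 res[exiting[exitI][1]] = currExitTime
--                 prevTime = currExitTime
--                 currTime = prevTime + 1
--                 exitI += 1
--                 exitPrio = True
--
--     while enterI < len(entering):
--         res[entering[enterI][1]] = max(entering[enterI][0], currTime)
--         currTime += 1
--         enterI += 1
--
--     while exitI < len(exiting):
--         res[exiting[exitI][1]] = max(exiting[exitI][0], currTime)
--         currTime += 1
--         exitI += 1
--     return res
-- ===== SOURCE B (Python) =====
-- def turnstileTimes(numCustomers, arrTime, direction):
--     t = arrTime[0]
--     # two stacks whose TOP (last element) is the lowest-index pending customer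
--     enter, exit_ = [], []
--     for i in reversed(range(numCustomers)):
--         (enter if direction[i] == 0 else exit_).append((arrTime[i], i))
--     res = [-1] * numCustomers
--     last_exit = True
--     while enter or exit_:
--         if enter and exit_:
--             ea, xa = enter[-1][0], exit_[-1][0]
--             t = max(t, min(ea, xa))
--             last_exit = xa <= t and (ea > t or last_exit)
--             a, i = (exit_ if last_exit else enter).pop()
--             res[i] = t
--         else:
--             a, i = (enter or exit_).pop()
--             res[i] = max(a, t)
--         t += 1
--     return res
-- ===== Notes on version B (the rewrite author's own statement) =====
-- stated objective: simpler
-- what changed: B keeps the pending customers on two stacks (built back-to-front so the top is the next customer), runs ONE unified while loop that pops from a stack chosen by a single lift-the-clock readiness test (no three-way compare of maxed service times, no prevTime/idle-gap reset, no index pointers) and handles the leftover queue inside the same loop instead of A's two extra tail loops.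
-- outside the precondition, e.g. on turnstileTimes(1, [], [0]): A raises IndexError, B raises IndexError; on turnstileTimes(2, [5], [0, 1]): A raises IndexError, B raises IndexError
import Mathlib
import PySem

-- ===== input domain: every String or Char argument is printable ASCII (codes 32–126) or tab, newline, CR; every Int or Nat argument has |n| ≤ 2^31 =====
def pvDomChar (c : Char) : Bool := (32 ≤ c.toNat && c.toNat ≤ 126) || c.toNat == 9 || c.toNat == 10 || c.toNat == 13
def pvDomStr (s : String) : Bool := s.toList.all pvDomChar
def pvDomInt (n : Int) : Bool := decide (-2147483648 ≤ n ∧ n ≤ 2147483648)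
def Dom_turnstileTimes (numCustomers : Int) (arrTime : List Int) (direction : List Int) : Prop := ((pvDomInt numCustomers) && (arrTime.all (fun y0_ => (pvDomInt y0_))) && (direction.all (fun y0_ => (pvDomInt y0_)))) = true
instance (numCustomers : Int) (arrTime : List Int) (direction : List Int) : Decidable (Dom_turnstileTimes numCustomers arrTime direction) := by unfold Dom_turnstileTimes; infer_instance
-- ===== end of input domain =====

-- B replaces A's three loops (three-way merge with prevTime/gap priority reset, then two
-- tail loops) by two stacks built back-to-front and ONE unified pop loop; same values.

-- ===== PORT A =====
-- the for-i-in-range loop building (entering, exiting) as queues of (arrival, original index)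
def pvA_build (numCustomers : Int) (arrTime : List Int) (direction : List Int) :
    List (Int × Nat) × List (Int × Nat) :=
  (PySem.List.pyRange 0 numCustomers 1).foldl
    (fun (p : List (Int × Nat) × List (Int × Nat)) i =>
      if PySem.List.pyGetD direction i 0 = 0 then
        (p.1 ++ [(PySem.List.pyGetD arrTime i 0, i.toNat)], p.2)
      else
        (p.1, p.2 ++ [(PySem.List.pyGetD arrTime i 0, i.toNat)]))
    ([], [])

-- the main while loop; returns (res, currTime, remaining entering, remaining exiting)
def pvA_merge : List (Int × Nat) → List (Int × Nat) → List Int → Bool → Int → Int →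
    List Int × Int × List (Int × Nat) × List (Int × Nat)
  | (ea, ei) :: en, (xa, xi) :: ex, res, exitPrio, currTime, prevTime =>
      let currExitTime := max xa currTime
      let currEnterTime := max ea currTime
      if currEnterTime < currExitTime then
        pvA_merge en ((xa, xi) :: ex) (res.set ei currEnterTime) false (currEnterTime + 1) currEnterTime
      else if currExitTime < currEnterTime then
        pvA_merge ((ea, ei) :: en) ex (res.set xi currExitTime) true (currExitTime + 1) currExitTime
      else
        let exitPrio := if currTime - prevTime > 1 then true else exitPrio
        if exitPrio = false then
          pvA_merge en ((xa, xi) :: ex) (res.set ei currEnterTime) exitPrio (currEnterTime + 1) currEnterTime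
        else
          pvA_merge ((ea, ei) :: en) ex (res.set xi currExitTime) true (currExitTime + 1) currExitTime
  | en, ex, res, _, currTime, _ => (res, currTime, en, ex)
termination_by en ex => en.length + ex.length

-- while enterI < len(entering): …
def pvA_tailE : List (Int × Nat) → List Int → Int → List Int × Int
  | (a, i) :: rest, res, currTime => pvA_tailE rest (res.set i (max a currTime)) (currTime + 1)
  | [], res, currTime => (res, currTime)

-- while exitI < len(exiting): …
def pvA_tailX : List (Int × Nat) → List Int → Int → List Int × Int
  | (a, i) :: rest, res, currTime => pvA_tailX rest (res.set i (max a currTime)) (currTime + 1)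
  | [], res, currTime => (res, currTime)

def turnstileTimes (numCustomers : Int) (arrTime : List Int) (direction : List Int) : List Int :=
  let start := (PySem.List.pyGet? arrTime 0).getD 0   -- arrTime[0]; IndexError on [] excluded by Pre_
  let p := pvA_build numCustomers arrTime direction
  let res := (PySem.List.pyRange 0 numCustomers 1).map (fun _ => (-1 : Int))
  let m := pvA_merge p.1 p.2 res true start (-1)
  let te := pvA_tailE m.2.2.1 m.1 m.2.1
  (pvA_tailX m.2.2.2 te.1 te.2).1

-- ===== PORT B =====
-- the reversed-range loop pushing (arrTime[i], i) onto the chosen stack; a Python stack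
-- (append/pop at the end) is encoded as a Lean list with its TOP at the head
def pvB_build (numCustomers : Int) (arrTime : List Int) (direction : List Int) :
    List (Int × Nat) × List (Int × Nat) :=
  (PySem.List.pyRange 0 numCustomers 1).reverse.foldl
    (fun (p : List (Int × Nat) × List (Int × Nat)) i =>
      if PySem.List.pyGetD direction i 0 = 0 then
        ((PySem.List.pyGetD arrTime i 0, i.toNat) :: p.1, p.2)
      else
        (p.1, (PySem.List.pyGetD arrTime i 0, i.toNat) :: p.2))
    ([], [])

-- while enter or exit_: pop one customer from the chosen stack
def pvB_loop : List (Int × Nat) → List (Int × Nat) → List Int → Bool → Int → List Int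
  | (ea, ei) :: en, (xa, xi) :: ex, res, lastExit, t0 =>
      let t := max t0 (min ea xa)
      if xa ≤ t ∧ (ea > t ∨ lastExit = true) then
        pvB_loop ((ea, ei) :: en) ex (res.set xi t) true (t + 1)
      else
        pvB_loop en ((xa, xi) :: ex) (res.set ei t) false (t + 1)
  | (a, i) :: en, [], res, lastExit, t => pvB_loop en [] (res.set i (max a t)) lastExit (t + 1)
  | [], (a, i) :: ex, res, lastExit, t => pvB_loop [] ex (res.set i (max a t)) lastExit (t + 1)
  | [], [], res, _, _ => res
termination_by en ex => en.length + ex.length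

def turnstileTimes_alt (numCustomers : Int) (arrTime : List Int) (direction : List Int) : List Int :=
  let t := (PySem.List.pyGet? arrTime 0).getD 0   -- arrTime[0]; IndexError on [] excluded by Pre_
  let p := pvB_build numCustomers arrTime direction
  let res := List.replicate numCustomers.toNat (-1 : Int)   -- [-1] * numCustomers
  pvB_loop p.1 p.2 res true t

-- ===== PRECONDITION & SPEC =====
-- Pre_ excludes exactly the inputs where the Python raises IndexError: empty arrTime
-- (start = arrTime[0]) or numCustomers exceeding the length of arrTime or direction.
def Pre_turnstileTimes (numCustomers : Int) (arrTime : List Int) (direction : List Int) : Prop :=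
  arrTime ≠ [] ∧ numCustomers ≤ (arrTime.length : Int) ∧ numCustomers ≤ (direction.length : Int)
instance (numCustomers : Int) (arrTime : List Int) (direction : List Int) : Decidable (Pre_turnstileTimes numCustomers arrTime direction) := by unfold Pre_turnstileTimes; infer_instance

def pvWitness_turnstileTimes : Int × List Int × List Int := (3, [0, 1, 2], [1, 0, 0])

def Spec_turnstileTimes (numCustomers : Int) (arrTime : List Int) (direction : List Int) (out : List Int) : Prop := out = turnstileTimes_alt numCustomers arrTime direction
instance (numCustomers : Int) (arrTime : List Int) (direction : List Int) (out : List Int) : Decidable (Spec_turnstileTimes numCustomers arrTime direction out) := by unfold Spec_turnstileTimes; infer_instance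

-- ===== CLAIM (what is proved, stated in full; the proofs are below) =====
def Claim_equal_turnstileTimes : Prop := ∀ (numCustomers : Int) (arrTime : List Int) (direction : List Int), Dom_turnstileTimes numCustomers arrTime direction → Pre_turnstileTimes numCustomers arrTime direction → Spec_turnstileTimes numCustomers arrTime direction (turnstileTimes numCustomers arrTime direction)

-- ===== LEMMAS AND PROOFS =====

lemma pv_build_aux (g : Int → Int × Nat) (p : Int → Prop) [DecidablePred p] (l : List Int)
    (accE accX : List (Int × Nat)) :
    l.reverse.foldl (fun acc i => if p i then (g i :: acc.1, acc.2) else (acc.1, g i :: acc.2))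
      (accE, accX) =
      ((l.filter (fun i => p i)).map g ++ accE, (l.filter (fun i => ¬ p i)).map g ++ accX) := by
  induction l generalizing accE accX with
  | nil => simp
  | cons a rest ih =>
      by_cases h : p a <;> simp [h, List.foldl_append, ih]

lemma pv_build_aux' (g : Int → Int × Nat) (p : Int → Prop) [DecidablePred p] (l : List Int)
    (accE accX : List (Int × Nat)) :
    l.foldl (fun acc i => if p i then (acc.1 ++ [g i], acc.2) else (acc.1, acc.2 ++ [g i]))
      (accE, accX) =
      (accE ++ (l.filter (fun i => p i)).map g, accX ++ (l.filter (fun i => ¬ p i)).map g) := by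
  induction l generalizing accE accX with
  | nil => simp
  | cons a rest ih =>
      by_cases h : p a <;> simp [h, ih]

lemma pv_build_eq (numCustomers : Int) (arrTime : List Int) (direction : List Int) :
    pvA_build numCustomers arrTime direction = pvB_build numCustomers arrTime direction := by
  unfold pvA_build pvB_build
  rw [pv_build_aux (fun i => (PySem.List.pyGetD arrTime i 0, i.toNat))
    (fun i => PySem.List.pyGetD direction i 0 = 0) _ [] [],
    pv_build_aux' (fun i => (PySem.List.pyGetD arrTime i 0, i.toNat))
    (fun i => PySem.List.pyGetD direction i 0 = 0) _ [] []]
  simp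

lemma pv_res_eq (numCustomers : Int) :
    (PySem.List.pyRange 0 numCustomers 1).map (fun _ => (-1 : Int)) =
      List.replicate numCustomers.toNat (-1 : Int) := by
  rw [List.map_const', PySem.List.length_pyRange_one]
  simp

lemma pvA_merge_nil_left (ex : List (Int × Nat)) (res : List Int) (prio : Bool) (t prev : Int) :
    pvA_merge [] ex res prio t prev = (res, t, [], ex) := by
  rw [pvA_merge]
  intro _ _ _ _ _ _ h _
  cases h

lemma pvA_merge_nil_right (en : List (Int × Nat)) (res : List Int) (prio : Bool) (t prev : Int) :
    pvA_merge en [] res prio t prev = (res, t, en, []) := by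
  cases en with
  | nil =>
      rw [pvA_merge]
      intro _ _ _ _ _ _ h _
      cases h
  | cons p l =>
      rcases p with ⟨a, i⟩
      rw [pvA_merge]
      intro _ _ _ _ _ _ _ h
      cases h

lemma pvB_loop_nil_left (ex : List (Int × Nat)) (res : List Int) (prio : Bool) (t : Int) :
    pvB_loop [] ex res prio t = (pvA_tailX ex res t).1 := by
  induction ex generalizing res t with
  | nil => simp [pvB_loop, pvA_tailX]
  | cons p rest ih => cases p; simp [pvB_loop, pvA_tailX, ih]

lemma pvB_loop_nil_right (en : List (Int × Nat)) (res : List Int) (prio : Bool) (t : Int) :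
    pvB_loop en [] res prio t = (pvA_tailE en res t).1 := by
  induction en generalizing res t with
  | nil => simp [pvB_loop, pvA_tailE]
  | cons p rest ih => cases p; simp [pvB_loop, pvA_tailE, ih]

-- the combined statement: A's merge followed by its two tail loops equals B's single loop
lemma pv_full_eq : ∀ (n : Nat) (en ex : List (Int × Nat)) (res : List Int) (prio : Bool) (t prev : Int),
    en.length + ex.length ≤ n →
    (prev = t - 1 ∨ (prev = -1 ∧ prio = true)) →
    (let m := pvA_merge en ex res prio t prev
     let te := pvA_tailE m.2.2.1 m.1 m.2.1
     (pvA_tailX m.2.2.2 te.1 te.2).1) = pvB_loop en ex res prio t := by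
  intro n
  induction n with
  | zero =>
      intro en ex res prio t prev hn _
      have he : en = [] := by cases en <;> simp_all
      subst he
      rw [pvA_merge_nil_left, pvB_loop_nil_left]
      simp [pvA_tailE]
  | succ n ih =>
      intro en ex res prio t prev hn hinv
      rcases en with _ | ⟨⟨ea, ei⟩, en⟩
      · rw [pvA_merge_nil_left, pvB_loop_nil_left]
        simp [pvA_tailE]
      rcases ex with _ | ⟨⟨xa, xi⟩, ex⟩
      · rw [pvA_merge_nil_right, pvB_loop_nil_right]
        simp [pvA_tailX]
      simp only [List.length_cons] at hn
      rw [pvA_merge, pvB_loop]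
      simp only []
      by_cases h1 : max ea t < max xa t
      · -- A serves enter; B: exit not ready, serves enter at the same time
        have ht : max t (min ea xa) = max ea t := by omega
        have hB : ¬ (xa ≤ max t (min ea xa) ∧ (ea > max t (min ea xa) ∨ prio = true)) := by
          rintro ⟨hx, -⟩; omega
        rw [if_pos h1, if_neg hB, ht]
        exact ih en ((xa, xi) :: ex) _ _ _ _ (by simp; omega) (Or.inl (by omega))
      · by_cases h2 : max xa t < max ea t
        · -- A serves exit; B: enter not ready, serves exit at the same time
          have ht : max t (min ea xa) = max xa t := by omega
          have hB : (xa ≤ max t (min ea xa) ∧ (ea > max t (min ea xa) ∨ prio = true)) := by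
            exact ⟨by omega, Or.inl (by omega)⟩
          rw [if_neg h1, if_pos h2, if_pos hB, ht]
          exact ih ((ea, ei) :: en) ex _ _ _ _ (by simp; omega) (Or.inl (by omega))
        · -- equal maxes: priority decides; A's gap reset is a no-op by the invariant
          have ht : max t (min ea xa) = max ea t := by omega
          have heq : max ea t = max xa t := by omega
          have hprio : (if t - prev > 1 then true else prio) = prio := by
            rcases hinv with h | ⟨h1', h2'⟩
            · rw [if_neg (by omega)]
            · rw [h2']; split <;> rfl
          rw [if_neg h1, if_neg h2, hprio]
          by_cases hp : prio = false
          · subst hp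
            have hB : ¬ (xa ≤ max t (min ea xa) ∧ (ea > max t (min ea xa) ∨ false = true)) := by
              rintro ⟨hx, hor⟩
              rcases hor with h | h
              · omega
              · cases h
            rw [if_pos rfl, if_neg hB, ht]
            exact ih en ((xa, xi) :: ex) _ _ _ _ (by simp; omega) (Or.inl (by omega))
          · have hpt : prio = true := by revert hp; cases prio <;> simp
            have hB : (xa ≤ max t (min ea xa) ∧ (ea > max t (min ea xa) ∨ prio = true)) := by
              exact ⟨by omega, Or.inr hpt⟩
            rw [if_neg hp, if_pos hB, ht, heq]
            exact ih ((ea, ei) :: en) ex _ _ _ _ (by simp; omega) (Or.inl (by omega))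

-- ===== VERDICT (by name: the statement is the Claim_ definition above) =====
theorem turnstileTimes_spec : Claim_equal_turnstileTimes := by
  intro numCustomers arrTime direction _ _
  unfold Spec_turnstileTimes turnstileTimes turnstileTimes_alt
  simp only [pv_build_eq, pv_res_eq]
  exact pv_full_eq ((pvB_build numCustomers arrTime direction).1.length
      + (pvB_build numCustomers arrTime direction).2.length) _ _ _ _ _ _ le_rfl (Or.inr ⟨rfl, rfl⟩)
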